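-- pv_equiv track=rewrite | github.com/jina4066/MJU-PS-Study | Gun/땅따먹기.py | solution
-- ===== SOURCE A (Python) =====
-- def solution(land):
--     # Solution 1
--     #for i in range(1, len(land)):
--      #   for j in range(len(land[0])):
--      #       land[i][j] += max(land[i - 1][:j] + land[i - 1][j + 1:])
--
--     #return max(land[-1])
--
--     # Solution 2
--     idxs = set(range(4))
--
--     for i in range(1, len(land)):
--         for idx in idxs:
--             scope = idxs - {idx}
--             pre_max_score = 0
--             for pre_idx in scope:
--                 score = land[i - 1][pre_idx]
--                 if pre_max_score < score:
--                     pre_max_score = score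
--
--             land[i][idx] += pre_max_score
--
--     return max(land[-1])
-- ===== SOURCE B (Python) =====
-- def solution(land):
--     for i in range(1, len(land)):
--         prev = land[i - 1]
--         # one pass over the previous row: largest value (floored at 0), its
--         # column, and the largest value among the other columns (floored at 0)
--         m1 = m2 = 0
--         j1 = -1
--         for j in range(4):
--             v = prev[j]
--             if v > m1:
--                 m2, m1, j1 = m1, v, j
--             elif v > m2:
--                 m2 = v
--         row = land[i]
--         for j in range(4):
--             row[j] += m2 if j == j1 else m1
--     return max(land[-1])
-- ===== Notes on version B (the rewrite author's own statement) =====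
-- stated objective: alternative
-- what changed: Per row, A rescans the other three columns for every one of the 4 columns; B scans the previous row once to precompute its largest value (with its column) and the largest value of the remaining columns, then picks per column.
-- outside the precondition, e.g. on solution([]): A raises IndexError, B raises IndexError
import Mathlib
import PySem

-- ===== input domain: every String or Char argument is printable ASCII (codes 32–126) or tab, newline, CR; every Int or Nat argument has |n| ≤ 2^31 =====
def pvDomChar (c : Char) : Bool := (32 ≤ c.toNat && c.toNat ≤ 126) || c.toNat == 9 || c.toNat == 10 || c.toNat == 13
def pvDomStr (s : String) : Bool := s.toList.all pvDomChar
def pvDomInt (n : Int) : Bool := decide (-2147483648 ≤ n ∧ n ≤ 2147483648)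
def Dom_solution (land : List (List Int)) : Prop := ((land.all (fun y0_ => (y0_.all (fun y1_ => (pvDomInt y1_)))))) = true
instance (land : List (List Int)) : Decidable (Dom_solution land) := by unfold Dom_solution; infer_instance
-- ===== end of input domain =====

-- B replaces A's per-column rescan of the other three columns with one top-two
-- scan of the previous row (an alternative decomposition of the same cost).
-- Both Pythons mutate `land` in place; the equivalence proved is about the return value.

-- ===== PORT A =====
-- scope = set(range(4)) - {idx}, iterated in Python's ascending small-int set
-- order, ported as a filter of [0,1,2,3]; pyGetD/pySetD are total stand-ins for
-- land[i-1][pre_idx] / land[i][idx] +=, exact under Pre_ (all indices in range).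
def aPremax (prev : List Int) (idx : Int) : Int :=
  (([0, 1, 2, 3] : List Int).filter (fun p => p != idx)).foldl
    (fun pre_max_score p =>
      let score := PySem.List.pyGetD prev p 0
      if pre_max_score < score then score else pre_max_score) 0

def aUpdateRow (prev row : List Int) : List Int :=
  ([0, 1, 2, 3] : List Int).foldl
    (fun r idx => PySem.List.pySetD r idx (PySem.List.pyGetD r idx 0 + aPremax prev idx)) row

def solution (land : List (List Int)) : Int :=
  match land with
  | [] => 0          -- Python: land[-1] raises IndexError here; excluded by Pre_
  | r0 :: rest =>
    let last := rest.foldl (fun prev row => aUpdateRow prev row) r0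
    (PySem.List.max? last (fun x => x)).getD 0   -- max([]) raises; excluded by Pre_

-- ===== PORT B =====
-- state (m1, m2, j1): largest value of prev[0..3] floored at 0, largest among
-- the other columns floored at 0, and the column of m1 (-1 if none positive)
def bScan (prev : List Int) : Int × Int × Int :=
  (PySem.List.pyRange 0 4 1).foldl
    (fun s j =>
      let v := PySem.List.pyGetD prev j 0
      if v > s.1 then (v, s.1, j)
      else if v > s.2.1 then (s.1, v, s.2.2)
      else s) (0, 0, -1)

def bUpdateRow (prev row : List Int) : List Int :=
  let t := bScan prev
  (PySem.List.pyRange 0 4 1).foldl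
    (fun r j =>
      PySem.List.pySetD r j
        (PySem.List.pyGetD r j 0 + (if j == t.2.2 then t.2.1 else t.1))) row

def solution_alt (land : List (List Int)) : Int :=
  match land with
  | [] => 0
  | r0 :: rest =>
    let last := rest.foldl (fun prev row => bUpdateRow prev row) r0
    (PySem.List.max? last (fun x => x)).getD 0

-- ===== PRECONDITION & SPEC =====
-- Pre_ excludes exactly the inputs on which A raises: empty land (IndexError on
-- land[-1]), a lone empty row (ValueError on max([])), and, with ≥ 2 rows, any
-- row shorter than 4 columns (IndexError on the fixed indices 0..3).
def Pre_solution (land : List (List Int)) : Prop :=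
  land ≠ [] ∧
    (if land.length = 1 then land.headD [] ≠ []
     else ∀ r ∈ land, 4 ≤ r.length)
instance (land : List (List Int)) : Decidable (Pre_solution land) := by
  unfold Pre_solution; infer_instance
def pvWitness_solution : List (List Int) := [[1, 2, 3, 4], [4, 3, 2, 1]]

def Spec_solution (land : List (List Int)) (out : Int) : Prop := out = solution_alt land
instance (land : List (List Int)) (out : Int) : Decidable (Spec_solution land out) := by unfold Spec_solution; infer_instance

-- ===== CLAIM (what is proved, stated in full; the proofs are below) =====
def Claim_equal_solution : Prop := ∀ (land : List (List Int)), Dom_solution land → Pre_solution land → Spec_solution land (solution land)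

-- ===== LEMMAS AND PROOFS =====

lemma pyRange04 : PySem.List.pyRange 0 4 1 = [0, 1, 2, 3] := by decide

def bStep (s : Int × Int × Int) (j v : Int) : Int × Int × Int :=
  if v > s.1 then (v, s.1, j) else if v > s.2.1 then (s.1, v, s.2.2) else s

def runScan (l : List (Int × Int)) : Int × Int × Int :=
  l.foldl (fun s p => bStep s p.1 p.2) (0, 0, -1)

def pick (s : Int × Int × Int) (idx : Int) : Int := if idx = s.2.2 then s.2.1 else s.1

def othersMax (l : List (Int × Int)) (idx : Int) : Int :=
  (l.filter (fun p => p.1 != idx)).foldl (fun m p => if m < p.2 then p.2 else m) 0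

lemma runScan_append (l : List (Int × Int)) (p : Int × Int) :
    runScan (l ++ [p]) = bStep (runScan l) p.1 p.2 := by
  simp [runScan, List.foldl_append]

lemma othersMax_append (l : List (Int × Int)) (j v idx : Int) :
    othersMax (l ++ [(j, v)]) idx =
      if j = idx then othersMax l idx
      else if othersMax l idx < v then v else othersMax l idx := by
  by_cases h : j = idx <;> simp [othersMax, List.filter_append, List.foldl_append, h]

lemma scan_inv (l : List (Int × Int)) (h0 : ∀ p ∈ l, 0 ≤ p.1)
    (hnd : (l.map Prod.fst).Nodup) :
    ((runScan l).2.2 = -1 ∨ (runScan l).2.2 ∈ l.map Prod.fst) ∧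
      (runScan l).2.1 ≤ (runScan l).1 ∧
      ∀ idx, pick (runScan l) idx = othersMax l idx := by
  induction l using List.reverseRecOn with
  | nil => refine ⟨Or.inl rfl, le_refl _, fun idx => ?_⟩; simp [runScan, pick, othersMax]
  | append_singleton l p ih =>
    obtain ⟨j, v⟩ := p
    have h0' : ∀ p ∈ l, 0 ≤ p.1 := fun p hp => h0 p (List.mem_append_left _ hp)
    have hj0 : (0 : Int) ≤ j := h0 (j, v) (List.mem_append_right _ (by simp))
    have hnd' : (l.map Prod.fst).Nodup := by
      rw [List.map_append] at hnd; exact (List.nodup_append.mp hnd).1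
    have hjnm : j ∉ l.map Prod.fst := by
      rw [List.map_append] at hnd
      intro hmem
      exact ((List.nodup_append.mp hnd).2.2 j hmem j (by simp)) rfl
    obtain ⟨hj1, hle, hpk⟩ := ih h0' hnd'
    have hjne : j ≠ (runScan l).2.2 := by
      rcases hj1 with h | h
      · omega
      · intro he; exact hjnm (he ▸ h)
    rw [runScan_append]
    dsimp only [bStep]
    split_ifs with h1 h2
    · -- v > m1 : new state (v, m1, j)
      refine ⟨Or.inr (by simp), by dsimp only; omega, fun idx => ?_⟩
      have hoi := hpk idx
      rw [othersMax_append]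
      unfold pick at hoi ⊢
      dsimp only
      by_cases hidx : idx = (runScan l).2.2
      · subst hidx
        rw [if_pos rfl] at hoi
        split_ifs <;> omega
      · rw [if_neg hidx] at hoi
        split_ifs <;> omega
    · -- m1 ≥ v > m2 : new state (m1, v, j1)
      refine ⟨?_, by dsimp only; omega, fun idx => ?_⟩
      · rcases hj1 with h | h
        · exact Or.inl h
        · refine Or.inr ?_
          rw [List.map_append]
          exact List.mem_append_left _ h
      have hoi := hpk idx
      rw [othersMax_append]
      unfold pick at hoi ⊢
      dsimp only
      by_cases hidx : idx = (runScan l).2.2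
      · subst hidx
        rw [if_pos rfl] at hoi
        split_ifs <;> omega
      · rw [if_neg hidx] at hoi
        split_ifs <;> omega
    · -- unchanged
      refine ⟨?_, hle, fun idx => ?_⟩
      · rcases hj1 with h | h
        · exact Or.inl h
        · refine Or.inr ?_
          rw [List.map_append]
          exact List.mem_append_left _ h
      have hoi := hpk idx
      rw [othersMax_append]
      unfold pick at hoi ⊢
      by_cases hidx : idx = (runScan l).2.2
      · subst hidx
        rw [if_pos rfl] at hoi
        split_ifs <;> omega
      · rw [if_neg hidx] at hoi
        split_ifs <;> omega

lemma bScan_eq_runScan (prev : List Int) :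
    bScan prev = runScan [(0, PySem.List.pyGetD prev 0 0), (1, PySem.List.pyGetD prev 1 0),
      (2, PySem.List.pyGetD prev 2 0), (3, PySem.List.pyGetD prev 3 0)] := by
  simp only [bScan, pyRange04, runScan, List.foldl, bStep]

lemma aPremax_eq_othersMax (prev : List Int) (idx : Int) :
    aPremax prev idx = othersMax [(0, PySem.List.pyGetD prev 0 0), (1, PySem.List.pyGetD prev 1 0),
      (2, PySem.List.pyGetD prev 2 0), (3, PySem.List.pyGetD prev 3 0)] idx := by
  simp only [aPremax, othersMax, List.filter_cons, List.filter_nil]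
  split_ifs <;> rfl

lemma col_eq (prev : List Int) (idx : Int) :
    (if idx == (bScan prev).2.2 then (bScan prev).2.1 else (bScan prev).1) = aPremax prev idx := by
  rw [show (if idx == (bScan prev).2.2 then (bScan prev).2.1 else (bScan prev).1)
        = pick (bScan prev) idx from by simp [pick]]
  rw [bScan_eq_runScan, aPremax_eq_othersMax]
  exact (scan_inv _ (by norm_num) (by norm_num)).2.2 idx

lemma update_eq (prev row : List Int) : aUpdateRow prev row = bUpdateRow prev row := by
  simp only [aUpdateRow, bUpdateRow, pyRange04, List.foldl, col_eq]

-- ===== VERDICT (by name: the statement is the Claim_ definition above) =====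
theorem solution_spec : Claim_equal_solution := by
  intro land _ _
  unfold Spec_solution solution solution_alt
  cases land with
  | nil => rfl
  | cons r0 rest =>
    have hfun : (fun prev row => aUpdateRow prev row) = (fun prev row => bUpdateRow prev row) :=
      funext fun p => funext fun r => update_eq p r
    rw [hfun]
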